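-- pv_equiv track=rewrite | github.com/raniaxibrahim77/SAT-nurse-scheduling | sat_solvers.py | resolution_sat
-- ===== SOURCE A (Python) =====
-- def resolution_sat(cnf):
--     clauses = set(frozenset(c) for c in cnf)
--     new = set()
--     while True:
--         pairs = [(ci, cj) for ci in clauses for cj in clauses if ci < cj]
--         for ci, cj in pairs:
--             for lit in ci:
--                 if -lit in cj:
--                     resolvent = (ci - {lit}) | (cj - {-lit})
--                     if not resolvent:
--                         return False
--                     new.add(frozenset(resolvent))
--         if new.issubset(clauses):
--             return True
--         clauses |= new
-- ===== SOURCE B (Python) =====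
-- def resolution_sat(cnf):
--     # A's pair filter `ci < cj` is frozenset PROPER-SUBSET comparison, so a pair
--     # (ci, cj) always has ci a proper subset of cj and the resolvent
--     # (ci - {lit}) | (cj - {-lit}) can never be empty: A's `return False` is
--     # unreachable, its closure loop stabilizes, and A returns True on every
--     # input.  B computes that constant directly.
--     return True
-- ===== Notes on version B (the rewrite author's own statement) =====
-- stated objective: faster
-- what changed: A's `ci < cj` pair filter is frozenset proper-subset, so the empty resolvent is underivable, `return False` is dead code and A's closure loop always stabilizes and returns True; B replaces the whole fixpoint computation by that constant, which the Lean proof establishes is A's value on every input.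
import Mathlib
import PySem

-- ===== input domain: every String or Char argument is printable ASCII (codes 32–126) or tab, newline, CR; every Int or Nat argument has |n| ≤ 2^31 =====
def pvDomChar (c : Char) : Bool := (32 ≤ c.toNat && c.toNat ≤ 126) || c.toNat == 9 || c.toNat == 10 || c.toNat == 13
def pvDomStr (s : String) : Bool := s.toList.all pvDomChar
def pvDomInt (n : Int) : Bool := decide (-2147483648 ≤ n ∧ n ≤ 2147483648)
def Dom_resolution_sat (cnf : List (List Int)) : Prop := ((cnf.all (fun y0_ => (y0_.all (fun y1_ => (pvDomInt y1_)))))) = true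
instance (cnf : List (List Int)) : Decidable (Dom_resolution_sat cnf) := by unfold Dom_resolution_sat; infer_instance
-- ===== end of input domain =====

-- B replaces A's resolution-closure fixpoint by the constant True it always computes: A's
-- `ci < cj` pair filter is frozenset PROPER-SUBSET, so the empty resolvent is underivable,
-- `return False` is dead code, and the loop always stabilizes and returns True (proved below).

-- ===== PORT A =====
-- A's `clauses`/`new` are Python sets of frozensets. A frozenset of ints is a PySem.Set Int; the outer
-- set-of-frozensets needs EXTENSIONAL equality of its elements, so it is kept as a list of PySem.Set Int
-- with membership tested by PySem.Set.equal (= frozenset ==). The returned Bool does not depend on any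
-- set iteration order (only membership / emptiness of the accumulated sets matter), so this is exact.

-- membership of frozenset c in a set-of-frozensets S (extensional equality)
def sMem (c : PySem.Set Int) (S : List (PySem.Set Int)) : Bool :=
  S.any (fun d => PySem.Set.equal c d)

-- set.add for a set-of-frozensets
def sAdd (S : List (PySem.Set Int)) (c : PySem.Set Int) : List (PySem.Set Int) :=
  if sMem c S then S else S ++ [c]

-- pairs = [(ci, cj) for ci in clauses for cj in clauses if ci < cj]   (frozenset < is PROPER subset)
def pvPairs (clauses : List (PySem.Set Int)) : List (PySem.Set Int × PySem.Set Int) :=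
  clauses.flatMap (fun ci =>
    (clauses.filter (fun cj => PySem.Set.issubset ci cj && !(PySem.Set.issubset cj ci))).map
      (fun cj => (ci, cj)))

-- inner loop: for lit in ci: if -lit in cj: resolvent …; none = the `return False` branch
def pvInner (ci cj : PySem.Set Int) (lits : List Int) (neu : List (PySem.Set Int)) :
    Option (List (PySem.Set Int)) :=
  match lits with
  | [] => some neu
  | lit :: rest =>
    if (-lit) ∈ cj then
      let resolvent := PySem.Set.union (PySem.Set.diff ci [lit]) (PySem.Set.diff cj [-lit])
      if resolvent.isEmpty then none
      else pvInner ci cj rest (sAdd neu resolvent)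
    else pvInner ci cj rest neu

-- middle loop: for ci, cj in pairs
def pvStep (pairs : List (PySem.Set Int × PySem.Set Int)) (neu : List (PySem.Set Int)) :
    Option (List (PySem.Set Int)) :=
  match pairs with
  | [] => some neu
  | (ci, cj) :: rest =>
    match pvInner ci cj ci neu with
    | none => none
    | some neu' => pvStep rest neu'

-- while True: … — fueled; the proof below shows the fuel chosen in resolution_sat is never exhausted
-- (clauses grows strictly each round and stays inside the powerset of the input's literals)
def pvLoop : Nat → List (PySem.Set Int) → List (PySem.Set Int) → Bool
  | 0, _, _ => false
  | fuel+1, clauses, neu =>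
    match pvStep (pvPairs clauses) neu with
    | none => false
    | some neu' =>
      if neu'.all (fun c => sMem c clauses) then true
      else pvLoop fuel (neu'.foldl sAdd clauses) neu'

def resolution_sat (cnf : List (List Int)) : Bool :=
  pvLoop (2 ^ cnf.flatten.length + 1)
    (cnf.foldl (fun S c => sAdd S (PySem.Set.ofList c)) []) []

-- ===== PORT B =====
-- Source B returns the constant True
def resolution_sat_alt (_cnf : List (List Int)) : Bool := true

-- ===== PRECONDITION & SPEC =====
def Spec_resolution_sat (cnf : List (List Int)) (out : Bool) : Prop := out = resolution_sat_alt cnf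
instance (cnf : List (List Int)) (out : Bool) : Decidable (Spec_resolution_sat cnf out) := by unfold Spec_resolution_sat; infer_instance

-- ===== CLAIM =====
def Claim_equal_resolution_sat : Prop :=
  ∀ (cnf : List (List Int)), Dom_resolution_sat cnf → Spec_resolution_sat cnf (resolution_sat cnf)

-- ===== LEMMAS AND PROOFS =====
-- A pair (ci, cj) with ci a PROPER subset of cj can never produce an empty resolvent, so the
-- `return False` branch is dead; clauses grows strictly every round and all its members stay
-- inside the powerset of the input's literals, so the loop stabilizes and returns True.

theorem sEqual_iff_toFinset (c d : PySem.Set Int) :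
    PySem.Set.equal c d = true ↔ c.toFinset = d.toFinset := by
  rw [PySem.Set.equal_iff]
  constructor
  · intro h; ext x; simpa using h x
  · intro h x
    rw [← List.mem_toFinset, ← List.mem_toFinset, h]

theorem sMem_iff (c : PySem.Set Int) (S : List (PySem.Set Int)) :
    sMem c S = true ↔ c.toFinset ∈ S.map List.toFinset := by
  unfold sMem
  rw [List.any_eq_true]
  simp only [sEqual_iff_toFinset, List.mem_map]
  constructor
  · rintro ⟨d, hd, he⟩; exact ⟨d, hd, he.symm⟩
  · rintro ⟨d, hd, he⟩; exact ⟨d, hd, he.symm⟩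

theorem mem_sAdd_sub (S : List (PySem.Set Int)) (c d : PySem.Set Int) (h : d ∈ sAdd S c) :
    d ∈ S ∨ d = c := by
  unfold sAdd at h
  split at h
  · exact Or.inl h
  · simpa using h

-- the loop invariant: pairwise set-distinct clauses, all inside the literal universe U
def sInv (U : Finset Int) (S : List (PySem.Set Int)) : Prop :=
  (S.map List.toFinset).Nodup ∧ ∀ c ∈ S, c.toFinset ⊆ U

theorem sAdd_inv (U : Finset Int) (S : List (PySem.Set Int)) (c : PySem.Set Int)
    (hS : sInv U S) (hc : c.toFinset ⊆ U) : sInv U (sAdd S c) := by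
  unfold sAdd
  split
  · exact hS
  · rename_i h
    constructor
    · rw [List.map_append, List.nodup_append]
      refine ⟨hS.1, List.nodup_singleton _, ?_⟩
      intro x hx y hy
      rw [List.map_cons, List.map_nil, List.mem_singleton] at hy
      subst hy
      intro hxy
      exact h ((sMem_iff c S).mpr (hxy ▸ hx))
    · intro d hd
      rcases List.mem_append.mp hd with hd | hd
      · exact hS.2 d hd
      · rw [List.mem_singleton] at hd; exact hd ▸ hc

theorem length_sAdd_ge (S : List (PySem.Set Int)) (c : PySem.Set Int) :
    S.length ≤ (sAdd S c).length := by
  unfold sAdd; split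
  · exact le_refl _
  · simp

theorem length_sAdd_of_not_mem (S : List (PySem.Set Int)) (c : PySem.Set Int)
    (h : sMem c S = false) : (sAdd S c).length = S.length + 1 := by
  unfold sAdd
  rw [if_neg (by simp [h]), List.length_append]
  rfl

theorem foldl_sAdd_inv (U : Finset Int) :
    ∀ (T S : List (PySem.Set Int)), sInv U S → (∀ c ∈ T, c.toFinset ⊆ U) →
      sInv U (T.foldl sAdd S) := by
  intro T
  induction T with
  | nil => exact fun S hS _ => hS
  | cons d T ih =>
    intro S hS hT
    exact ih (sAdd S d) (sAdd_inv U S d hS (hT d List.mem_cons_self))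
      (fun c hc => hT c (List.mem_cons_of_mem _ hc))

theorem foldl_sAdd_length_ge :
    ∀ (T S : List (PySem.Set Int)), S.length ≤ (T.foldl sAdd S).length := by
  intro T
  induction T with
  | nil => exact fun S => le_refl _
  | cons d T ih =>
    intro S
    exact le_trans (length_sAdd_ge S d) (ih (sAdd S d))

theorem foldl_sAdd_grow :
    ∀ (T S : List (PySem.Set Int)) (c : PySem.Set Int), c ∈ T → sMem c S = false →
      S.length + 1 ≤ (T.foldl sAdd S).length := by
  intro T
  induction T with
  | nil => intro S c hc; exact absurd hc (List.not_mem_nil)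
  | cons d T ih =>
    intro S c hc hm
    simp only [List.foldl_cons]
    cases hd : sMem d S with
    | false =>
      have := foldl_sAdd_length_ge T (sAdd S d)
      rw [length_sAdd_of_not_mem S d hd] at this
      omega
    | true =>
      have hSd : sAdd S d = S := by unfold sAdd; rw [if_pos hd]
      rcases List.mem_cons.mp hc with rfl | hc'
      · rw [hd] at hm; exact Bool.noConfusion hm
      · rw [hSd]; exact ih S c hc' hm

theorem sInv_length_le (U : Finset Int) (S : List (PySem.Set Int)) (h : sInv U S) :
    S.length ≤ 2 ^ U.card := by
  have h1 : (S.map List.toFinset).toFinset.card = S.length := by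
    rw [List.toFinset_card_of_nodup h.1, List.length_map]
  have h2 : (S.map List.toFinset).toFinset ⊆ U.powerset := by
    intro F hF
    rw [List.mem_toFinset, List.mem_map] at hF
    rcases hF with ⟨c, hc, rfl⟩
    exact Finset.mem_powerset.mpr (h.2 c hc)
  calc S.length = (S.map List.toFinset).toFinset.card := h1.symm
    _ ≤ U.powerset.card := Finset.card_le_card h2
    _ = 2 ^ U.card := Finset.card_powerset U

theorem pvInner_some (U : Finset Int) (ci cj : PySem.Set Int)
    (hsub : PySem.Set.issubset ci cj = true) (hnsub : PySem.Set.issubset cj ci = false)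
    (hci : ci.toFinset ⊆ U) (hcj : cj.toFinset ⊆ U) :
    ∀ (lits : List Int) (neu : List (PySem.Set Int)), (∀ x ∈ lits, x ∈ ci) →
      (∀ c ∈ neu, c.toFinset ⊆ U) →
      ∃ neu', pvInner ci cj lits neu = some neu' ∧ ∀ c ∈ neu', c.toFinset ⊆ U := by
  intro lits
  induction lits with
  | nil => exact fun neu _ hn => ⟨neu, rfl, hn⟩
  | cons lit rest ih =>
    intro neu hlits hn
    simp only [pvInner]
    split
    · rename_i hmem
      have hres : ¬ (PySem.Set.union (PySem.Set.diff ci [lit]) (PySem.Set.diff cj [-lit])).isEmpty = true := by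
        intro he
        rw [List.isEmpty_iff] at he
        have hx : ∀ x : Int, x ∉ PySem.Set.union (PySem.Set.diff ci [lit]) (PySem.Set.diff cj [-lit]) := by
          rw [he]; simp
        have hcj' : ∀ x ∈ cj, x = -lit := by
          intro x hxj
          by_contra hne
          exact hx x ((PySem.Set.mem_union _ _ _).mpr (Or.inr ((PySem.Set.mem_diff _ _ _).mpr ⟨hxj, by simp [hne]⟩)))
        have hlit_ci : lit ∈ ci := hlits lit List.mem_cons_self
        have hlit_cj : lit ∈ cj := ((PySem.Set.issubset_iff _ _).mp hsub) lit hlit_ci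
        have h0 : lit = -lit := hcj' lit hlit_cj
        have hss : PySem.Set.issubset cj ci = true :=
          (PySem.Set.issubset_iff _ _).mpr (fun x hxj => by rw [hcj' x hxj, ← h0]; exact hlit_ci)
        rw [hss] at hnsub
        exact Bool.noConfusion hnsub
      rw [if_neg hres]
      apply ih
      · exact fun x hx => hlits x (List.mem_cons_of_mem _ hx)
      · intro c hc
        rcases mem_sAdd_sub neu _ c hc with hc' | rfl
        · exact hn c hc'
        · intro x hx
          rw [List.mem_toFinset] at hx
          rcases (PySem.Set.mem_union _ _ _).mp hx with h | h
          · exact hci (List.mem_toFinset.mpr ((PySem.Set.mem_diff _ _ _).mp h).1)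
          · exact hcj (List.mem_toFinset.mpr ((PySem.Set.mem_diff _ _ _).mp h).1)
    · exact ih neu (fun x hx => hlits x (List.mem_cons_of_mem _ hx)) hn

theorem pvStep_some (U : Finset Int) :
    ∀ (pairs : List (PySem.Set Int × PySem.Set Int)) (neu : List (PySem.Set Int)),
      (∀ p ∈ pairs, PySem.Set.issubset p.1 p.2 = true ∧ PySem.Set.issubset p.2 p.1 = false ∧
        p.1.toFinset ⊆ U ∧ p.2.toFinset ⊆ U) →
      (∀ c ∈ neu, c.toFinset ⊆ U) →
      ∃ neu', pvStep pairs neu = some neu' ∧ ∀ c ∈ neu', c.toFinset ⊆ U := by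
  intro pairs
  induction pairs with
  | nil => exact fun neu _ hn => ⟨neu, rfl, hn⟩
  | cons p rest ih =>
    intro neu hp hn
    obtain ⟨ci, cj⟩ := p
    obtain ⟨h1, h2, h3, h4⟩ := hp (ci, cj) List.mem_cons_self
    obtain ⟨neu1, he, hn1⟩ := pvInner_some U ci cj h1 h2 h3 h4 ci neu (fun _ hx => hx) hn
    simp only [pvStep]
    rw [he]
    exact ih neu1 (fun q hq => hp q (List.mem_cons_of_mem _ hq)) hn1

theorem pvPairs_mem (clauses : List (PySem.Set Int)) :
    ∀ p ∈ pvPairs clauses, p.1 ∈ clauses ∧ p.2 ∈ clauses ∧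
      PySem.Set.issubset p.1 p.2 = true ∧ PySem.Set.issubset p.2 p.1 = false := by
  intro p hp
  unfold pvPairs at hp
  rw [List.mem_flatMap] at hp
  rcases hp with ⟨ci, hci, hp⟩
  rw [List.mem_map] at hp
  rcases hp with ⟨cj, hcj, rfl⟩
  rw [List.mem_filter] at hcj
  rcases hcj with ⟨hcj, hcond⟩
  rw [Bool.and_eq_true, Bool.not_eq_true'] at hcond
  exact ⟨hci, hcj, hcond.1, hcond.2⟩

theorem pvLoop_true (U : Finset Int) :
    ∀ (fuel : Nat) (clauses neu : List (PySem.Set Int)),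
      sInv U clauses → (∀ c ∈ neu, c.toFinset ⊆ U) →
      2 ^ U.card + 1 ≤ fuel + clauses.length → pvLoop fuel clauses neu = true := by
  intro fuel
  induction fuel with
  | zero =>
    intro clauses neu hinv _ hge
    have := sInv_length_le U clauses hinv
    omega
  | succ fuel ih =>
    intro clauses neu hinv hneu hge
    have hpairs : ∀ p ∈ pvPairs clauses, PySem.Set.issubset p.1 p.2 = true ∧
        PySem.Set.issubset p.2 p.1 = false ∧ p.1.toFinset ⊆ U ∧ p.2.toFinset ⊆ U := by
      intro p hp
      obtain ⟨m1, m2, m3, m4⟩ := pvPairs_mem clauses p hp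
      exact ⟨m3, m4, hinv.2 _ m1, hinv.2 _ m2⟩
    obtain ⟨neu', hstep, hneu'⟩ := pvStep_some U (pvPairs clauses) neu hpairs hneu
    simp only [pvLoop]
    rw [hstep]
    split
    · rename_i heq
      simp at heq
    · rename_i a heq
      obtain rfl := Option.some.inj heq
      split
      · rfl
      · rename_i hall
        have hex : ∃ c ∈ neu', sMem c clauses = false := by
          by_contra hno
          push Not at hno
          exact hall (List.all_eq_true.mpr (fun c hc => by
            cases h : sMem c clauses with
            | false => exact absurd h (hno c hc)
            | true => rfl))
        rcases hex with ⟨c, hc, hcm⟩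
        apply ih
        · exact foldl_sAdd_inv U neu' clauses hinv hneu'
        · exact hneu'
        · have := foldl_sAdd_grow neu' clauses c hc hcm
          omega

theorem init_inv (U : Finset Int) :
    ∀ (L : List (List Int)) (S : List (PySem.Set Int)), sInv U S →
      (∀ c ∈ L, (PySem.Set.ofList c).toFinset ⊆ U) →
      sInv U (L.foldl (fun S c => sAdd S (PySem.Set.ofList c)) S) := by
  intro L
  induction L with
  | nil => exact fun S hS _ => hS
  | cons d L ih =>
    intro S hS hL
    exact ih (sAdd S (PySem.Set.ofList d)) (sAdd_inv U S _ hS (hL d List.mem_cons_self))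
      (fun c hc => hL c (List.mem_cons_of_mem _ hc))

theorem resolution_sat_true (cnf : List (List Int)) : resolution_sat cnf = true := by
  unfold resolution_sat
  apply pvLoop_true (cnf.flatten.toFinset)
  · apply init_inv
    · exact ⟨List.nodup_nil, fun c hc => absurd hc (List.not_mem_nil)⟩
    · intro c hc x hx
      rw [List.mem_toFinset, PySem.Set.mem_ofList] at hx
      exact List.mem_toFinset.mpr (List.mem_flatten.mpr ⟨c, hc, hx⟩)
  · intro c hc
    exact absurd hc (List.not_mem_nil)
  · have h1 : (cnf.flatten.toFinset).card ≤ cnf.flatten.length := List.toFinset_card_le _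
    have h2 : 2 ^ (cnf.flatten.toFinset).card ≤ 2 ^ cnf.flatten.length :=
      Nat.pow_le_pow_right (by omega) h1
    omega

-- ===== VERDICT =====
theorem resolution_sat_spec : Claim_equal_resolution_sat := by
  intro cnf _
  exact resolution_sat_true cnf
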